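-- pv_equiv track=rewrite | github.com/yoav235/intro2cs | ex2/temperature.py | is_vormir_safe
-- ===== SOURCE A (Python) =====
-- def is_vormir_safe(safe_temp, day1_temp, day2_temp, day3_temp):
--     three_days_forecast = [day1_temp, day2_temp, day3_temp]
--     good_day_counter = 0
--     for temp in three_days_forecast:
--         if safe_temp < temp:
--             good_day_counter += 1
--         if good_day_counter > 1:
--             return True
--     return False
-- ===== SOURCE B (Python) =====
-- def is_vormir_safe(safe_temp, day1_temp, day2_temp, day3_temp):
--     a = safe_temp < day1_temp
--     b = safe_temp < day2_temp
--     c = safe_temp < day3_temp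
--     return (a and b) or (a and c) or (b and c)
-- ===== Notes on version B (the rewrite author's own statement) =====
-- stated objective: simpler
-- what changed: Replaced the list + counter loop with early return by a direct closed-form majority expression over the three strict comparisons.
import Mathlib
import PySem

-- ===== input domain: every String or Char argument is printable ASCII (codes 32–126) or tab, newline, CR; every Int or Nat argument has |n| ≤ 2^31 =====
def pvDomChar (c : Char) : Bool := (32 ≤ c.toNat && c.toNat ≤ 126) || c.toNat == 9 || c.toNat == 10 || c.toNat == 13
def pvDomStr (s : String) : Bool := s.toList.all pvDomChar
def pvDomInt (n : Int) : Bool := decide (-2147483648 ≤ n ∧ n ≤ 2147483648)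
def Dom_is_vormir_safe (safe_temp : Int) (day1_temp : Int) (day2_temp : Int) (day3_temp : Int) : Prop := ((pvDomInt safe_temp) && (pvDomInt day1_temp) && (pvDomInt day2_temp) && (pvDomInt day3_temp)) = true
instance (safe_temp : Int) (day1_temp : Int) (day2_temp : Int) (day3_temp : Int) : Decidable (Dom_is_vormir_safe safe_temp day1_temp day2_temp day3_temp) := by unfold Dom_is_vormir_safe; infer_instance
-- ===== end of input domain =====

-- B replaces A's counter loop with a closed-form boolean majority of the three comparisons (simpler).

-- ===== PORT A =====
-- A's for-loop with early return, transliterated: recursion over the forecast list with the counter as state.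
def isVormirLoopA (safe_temp : Int) : List Int → Int → Bool
  | [], _ => false
  | temp :: rest, good_day_counter =>
    let good_day_counter := if safe_temp < temp then good_day_counter + 1 else good_day_counter
    if good_day_counter > 1 then true else isVormirLoopA safe_temp rest good_day_counter

def is_vormir_safe (safe_temp : Int) (day1_temp : Int) (day2_temp : Int) (day3_temp : Int) : Bool :=
  isVormirLoopA safe_temp [day1_temp, day2_temp, day3_temp] 0

-- ===== PORT B =====
def is_vormir_safe_alt (safe_temp : Int) (day1_temp : Int) (day2_temp : Int) (day3_temp : Int) : Bool :=
  let a := safe_temp < day1_temp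
  let b := safe_temp < day2_temp
  let c := safe_temp < day3_temp
  (a && b) || (a && c) || (b && c)

-- ===== PRECONDITION & SPEC =====
def Spec_is_vormir_safe (safe_temp : Int) (day1_temp : Int) (day2_temp : Int) (day3_temp : Int) (out : Bool) : Prop := out = is_vormir_safe_alt safe_temp day1_temp day2_temp day3_temp
instance (safe_temp : Int) (day1_temp : Int) (day2_temp : Int) (day3_temp : Int) (out : Bool) : Decidable (Spec_is_vormir_safe safe_temp day1_temp day2_temp day3_temp out) := by unfold Spec_is_vormir_safe; infer_instance

-- ===== CLAIM (what is proved, stated in full; the proofs are below) =====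
def Claim_equal_is_vormir_safe : Prop := ∀ (safe_temp : Int) (day1_temp : Int) (day2_temp : Int) (day3_temp : Int), Dom_is_vormir_safe safe_temp day1_temp day2_temp day3_temp → Spec_is_vormir_safe safe_temp day1_temp day2_temp day3_temp (is_vormir_safe safe_temp day1_temp day2_temp day3_temp)

-- ===== LEMMAS AND PROOFS =====

-- ===== VERDICT (by name: the statement is the Claim_ definition above) =====
theorem is_vormir_safe_spec : Claim_equal_is_vormir_safe := by
  intro s d1 d2 d3 _
  unfold Spec_is_vormir_safe is_vormir_safe is_vormir_safe_alt isVormirLoopA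
  by_cases h1 : s < d1 <;> by_cases h2 : s < d2 <;> by_cases h3 : s < d3 <;>
    simp [h1, h2, h3, isVormirLoopA]
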